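-- pv_equiv track=rewrite | github.com/enestasyurek/UAV-Detection- | src/tracking/drone_specific_tracker.py | _group_by_range
-- ===== SOURCE A (Python) =====
-- from typing import List, Dict, Tuple, Optional
--
-- def _group_by_range(detections: List[Dict]) -> Dict[str, List[Dict]]:
--     """Tespitleri mesafeye göre grupla"""
--     groups = {'near': [], 'medium': [], 'far': []}
--
--     for det in detections:
--         area = det.get('area', 0)
--         if area > 10000:
--             groups['near'].append(det)
--         elif area > 1000:
--             groups['medium'].append(det)
--         else:
--             groups['far'].append(det)
--
--     return groups
-- ===== SOURCE B (Python) =====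
-- def _group_by_range(detections):
--     """Tespitleri mesafeye göre grupla"""
--     return {
--         'near':   [d for d in detections if d.get('area', 0) > 10000],
--         'medium': [d for d in detections if 1000 < d.get('area', 0) <= 10000],
--         'far':    [d for d in detections if d.get('area', 0) <= 1000],
--     }
-- ===== Notes on version B (the rewrite author's own statement) =====
-- stated objective: idiomatic
-- what changed: Replaces the single mutating partition loop over a pre-built dict with three independent filtered list comprehensions, one per bucket, assembled directly into the result dict.
import Mathlib
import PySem

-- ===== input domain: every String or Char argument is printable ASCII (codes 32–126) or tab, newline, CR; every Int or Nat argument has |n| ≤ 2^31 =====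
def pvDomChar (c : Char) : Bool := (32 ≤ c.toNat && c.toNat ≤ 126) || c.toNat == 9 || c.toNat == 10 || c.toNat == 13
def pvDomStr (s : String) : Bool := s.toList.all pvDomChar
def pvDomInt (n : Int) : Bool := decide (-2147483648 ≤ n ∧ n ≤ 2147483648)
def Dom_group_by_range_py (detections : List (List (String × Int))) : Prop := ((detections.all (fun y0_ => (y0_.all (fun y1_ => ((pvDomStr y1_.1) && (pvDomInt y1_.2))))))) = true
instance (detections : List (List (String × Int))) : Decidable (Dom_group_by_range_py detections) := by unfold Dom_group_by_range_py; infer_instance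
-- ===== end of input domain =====

-- B changes the decomposition only: one mutating partition loop becomes three independent filters (idiomatic; same cost).

-- det.get('area', 0) on the association-list encoding of a Python dict
def pvArea (det : List (String × Int)) : Int :=
  (PySem.Dict.ofList det).getD "area" 0

-- ===== PORT A =====
-- single pass; the dict {'near': [], 'medium': [], 'far': []} with its three fixed keys
-- is carried as a triple of lists, appended to exactly as A appends
def group_by_range_py (detections : List (List (String × Int))) : List (String × List (List (String × Int))) :=
  let groups := detections.foldl
    (fun (g : List (List (String × Int)) × List (List (String × Int)) × List (List (String × Int))) det =>
      let area := pvArea det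
      if area > 10000 then (g.1 ++ [det], g.2.1, g.2.2)
      else if area > 1000 then (g.1, g.2.1 ++ [det], g.2.2)
      else (g.1, g.2.1, g.2.2 ++ [det]))
    ([], [], [])
  [("near", groups.1), ("medium", groups.2.1), ("far", groups.2.2)]

-- ===== PORT B =====
-- three independent filtered scans, one per bucket
def group_by_range_py_alt (detections : List (List (String × Int))) : List (String × List (List (String × Int))) :=
  [("near",   detections.filter (fun d => pvArea d > 10000)),
   ("medium", detections.filter (fun d => 1000 < pvArea d && pvArea d ≤ 10000)),
   ("far",    detections.filter (fun d => pvArea d ≤ 1000))]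

-- ===== PRECONDITION & SPEC =====
def Spec_group_by_range_py (detections : List (List (String × Int))) (out : List (String × List (List (String × Int)))) : Prop := out = group_by_range_py_alt detections
instance (detections : List (List (String × Int))) (out : List (String × List (List (String × Int)))) : Decidable (Spec_group_by_range_py detections out) := by unfold Spec_group_by_range_py; infer_instance

-- ===== CLAIM (what is proved, stated in full; the proofs are below) =====
def Claim_equal_group_by_range_py : Prop := ∀ (detections : List (List (String × Int))), Dom_group_by_range_py detections → Spec_group_by_range_py detections (group_by_range_py detections)

-- ===== LEMMAS AND PROOFS =====

-- loop invariant: the fold is the three accumulators extended by the three filters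
theorem pv_fold_eq_filters (l : List (List (String × Int)))
    (n m f : List (List (String × Int))) :
    l.foldl
      (fun (g : List (List (String × Int)) × List (List (String × Int)) × List (List (String × Int))) det =>
        let area := pvArea det
        if area > 10000 then (g.1 ++ [det], g.2.1, g.2.2)
        else if area > 1000 then (g.1, g.2.1 ++ [det], g.2.2)
        else (g.1, g.2.1, g.2.2 ++ [det]))
      (n, m, f)
    = (n ++ l.filter (fun d => pvArea d > 10000),
       m ++ l.filter (fun d => 1000 < pvArea d && pvArea d ≤ 10000),
       f ++ l.filter (fun d => pvArea d ≤ 1000)) := by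
  induction l generalizing n m f with
  | nil => simp
  | cons d t ih =>
    simp only [List.foldl_cons, List.filter_cons]
    by_cases h1 : pvArea d > 10000
    · simp [h1, ih, show ¬(1000 < pvArea d ∧ pvArea d ≤ 10000) by omega,
            show ¬(pvArea d ≤ 1000) by omega]
    · by_cases h2 : pvArea d > 1000
      · simp [h1, h2, ih, show pvArea d ≤ 10000 by omega,
              show ¬(pvArea d ≤ 1000) by omega]
      · simp [h1, h2, ih, show pvArea d ≤ 1000 by omega]

-- ===== VERDICT (by name: the statement is the Claim_ definition above) =====
theorem group_by_range_py_spec : Claim_equal_group_by_range_py := by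
  intro detections _
  unfold Spec_group_by_range_py group_by_range_py group_by_range_py_alt
  simp [pv_fold_eq_filters]
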